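-- pv_equiv track=rewrite | github.com/Beschroe/Hierarchical_Tucker_Tensor_Package | HTucker/HTucker/_change_root.py | _get_dimensions_for_each_node_helper
-- ===== SOURCE A (Python) =====
-- def _get_dimensions_for_each_node_helper(nodes, node, mapping):
--     """
--     Hinweis: Das ist eine interne Funktion von _make_node_to_child_of_root
--     """
--     if node in mapping:
--         return mapping[node]
--     elif not nodes[node]:
--         mapping[node] = node
--         return node
--     else:
--         l, r = nodes[node]
--         mapping[node] = (_get_dimensions_for_each_node_helper(nodes, l, mapping) +
--                          _get_dimensions_for_each_node_helper(nodes, r, mapping))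
--         return mapping[node]
-- ===== SOURCE B (Python) =====
-- def _get_dimensions_for_each_node_helper(nodes, node, mapping):
--     # Iterative explicit-stack post-order traversal; `mapping` is the memo.
--     if node in mapping:
--         return mapping[node]
--     stack = [node]
--     while stack:
--         n = stack.pop()
--         if n in mapping:
--             continue
--         if not nodes[n]:
--             mapping[n] = n
--         else:
--             l, r = nodes[n]
--             if l in mapping and r in mapping:
--                 mapping[n] = mapping[l] + mapping[r]
--             else:
--                 stack.append(n)
--                 stack.append(r)
--                 stack.append(l)
--     return mapping[node]
-- ===== Notes on version B (the rewrite author's own statement) =====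
-- stated objective: alternative
-- what changed: Replaces the memoized recursion with a non-recursive post-order traversal driven by an explicit stack: a popped node is skipped if memoized, resolved if it is a leaf or both children are memoized, and otherwise re-pushed beneath its two children.
import Mathlib
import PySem

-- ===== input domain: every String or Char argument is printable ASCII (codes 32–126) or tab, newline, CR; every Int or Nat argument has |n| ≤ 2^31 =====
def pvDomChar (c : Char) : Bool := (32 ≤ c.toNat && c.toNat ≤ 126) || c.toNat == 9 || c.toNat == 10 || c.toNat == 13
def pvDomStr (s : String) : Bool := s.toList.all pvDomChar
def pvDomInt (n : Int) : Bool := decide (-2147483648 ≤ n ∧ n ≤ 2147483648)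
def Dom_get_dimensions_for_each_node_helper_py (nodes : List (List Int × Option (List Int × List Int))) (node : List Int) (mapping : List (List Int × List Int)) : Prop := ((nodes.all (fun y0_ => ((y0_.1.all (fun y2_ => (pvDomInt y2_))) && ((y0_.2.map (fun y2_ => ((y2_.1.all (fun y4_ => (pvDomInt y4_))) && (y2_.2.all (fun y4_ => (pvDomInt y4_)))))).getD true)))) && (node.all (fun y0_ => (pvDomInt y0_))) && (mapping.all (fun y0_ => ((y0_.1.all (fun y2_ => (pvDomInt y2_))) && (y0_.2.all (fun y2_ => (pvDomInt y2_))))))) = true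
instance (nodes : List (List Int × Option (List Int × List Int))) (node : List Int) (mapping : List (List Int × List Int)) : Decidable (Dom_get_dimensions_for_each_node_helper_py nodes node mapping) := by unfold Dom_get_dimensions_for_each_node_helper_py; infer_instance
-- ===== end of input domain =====

-- B replaces the memoized recursion by an iterative explicit-stack post-order traversal with
-- `mapping` as the memo (alternative decomposition, same cost); the proved equivalence is about
-- the return value (on the admitted inputs both write the same reachable entries into `mapping`).


-- ===== PORT A =====
-- A's memoized recursion; the returned value and the evolving memo dict are threaded as a pair.
-- The fuel `nodes.length + 2` only makes the recursion total: under Pre_ every root-to-terminal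
-- path of the reachable subtree has at most nodes.length + 1 vertices, so fuel never runs out.
def goA (nodesD : PySem.Dict (List Int) (Option (List Int × List Int))) :
    Nat → List Int → PySem.Dict (List Int) (List Int) →
    (List Int × PySem.Dict (List Int) (List Int))
  | 0, _, m => ([], m)
  | f+1, node, m =>
    match m.get? node with
    | some v => (v, m)                           -- if node in mapping: return mapping[node]
    | none =>
      match nodesD.get? node with
      | none => ([], m)                          -- KeyError: excluded by Pre_
      | some none => (node, m.insert node node)  -- leaf: mapping[node] = node; return node
      | some (some (l, r)) =>
          let pl := goA nodesD f l m
          let pr := goA nodesD f r pl.2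
          (pl.1 ++ pr.1, pr.2.insert node (pl.1 ++ pr.1))  -- mapping[node] = left + right

def get_dimensions_for_each_node_helper_py (nodes : List (List Int × Option (List Int × List Int))) (node : List Int) (mapping : List (List Int × List Int)) : List Int :=
  (goA (PySem.Dict.ofList nodes) (nodes.length + 2) node (PySem.Dict.ofList mapping)).1

-- ===== PORT B =====
-- B's while loop over the explicit stack.  The fuel `4 ^ (nodes.length + 1)` only makes the
-- loop total: under Pre_ the loop performs fewer iterations than that and exits on [] before
-- the fuel is exhausted (goB_run below proves the bound); it is never reached under Pre_.
def goB (nodesD : PySem.Dict (List Int) (Option (List Int × List Int))) :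
    Nat → List (List Int) → PySem.Dict (List Int) (List Int) →
    PySem.Dict (List Int) (List Int)
  | 0, _, m => m
  | _+1, [], m => m                              -- while stack: … exits
  | f+1, n :: rest, m =>
    match m.get? n with
    | some _ => goB nodesD f rest m              -- if n in mapping: continue
    | none =>
      match nodesD.get? n with
      | none => goB nodesD f rest m              -- KeyError: excluded by Pre_
      | some none => goB nodesD f rest (m.insert n n)                 -- leaf
      | some (some (l, r)) =>
        match m.get? l, m.get? r with
        | some vl, some vr => goB nodesD f rest (m.insert n (vl ++ vr))
        | _, _ => goB nodesD f (l :: r :: n :: rest) m   -- re-push n below r below l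

def get_dimensions_for_each_node_helper_py_alt (nodes : List (List Int × Option (List Int × List Int))) (node : List Int) (mapping : List (List Int × List Int)) : List Int :=
  let nodesD := PySem.Dict.ofList nodes
  let m0 := PySem.Dict.ofList mapping
  match m0.get? node with
  | some v => v
  | none =>
    let m := goB nodesD (4 ^ (nodes.length + 1)) [node] m0
    (m.get? node).getD []                        -- return mapping[node] (present under Pre_)

-- ===== PRECONDITION & SPEC =====
-- Shape of the input graph (no algorithm is executed here: pvOk threads no memo and computes no
-- values; it is the standard inductive definition of "the subtree hanging from n, cut at keys
-- already in mapping, is a well-founded binary tree of depth ≤ d whose vertices are all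
-- resolvable" — acyclicity of a graph has no non-inductive closed form)
def pvOk (nodesD : PySem.Dict (List Int) (Option (List Int × List Int)))
    (m0 : PySem.Dict (List Int) (List Int)) : Nat → List Int → Bool
  | 0, _ => false
  | f+1, n =>
    m0.contains n ||
    match nodesD.get? n with
    | none => false
    | some none => true
    | some (some (l, r)) => pvOk nodesD m0 f l && pvOk nodesD m0 f r

-- Pre_ admits exactly the inputs on which A returns: the subtree reachable from `node` (cut at
-- pre-seeded `mapping` keys) is an acyclic, fully keyed binary tree — on a returning run every
-- root-to-terminal path visits distinct keys of `nodes` plus at most one terminal, so its depth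
-- is at most nodes.length + 1; otherwise A raises KeyError or RecursionError.
def Pre_get_dimensions_for_each_node_helper_py (nodes : List (List Int × Option (List Int × List Int))) (node : List Int) (mapping : List (List Int × List Int)) : Prop :=
  pvOk (PySem.Dict.ofList nodes) (PySem.Dict.ofList mapping) (nodes.length + 1) node = true
instance (nodes : List (List Int × Option (List Int × List Int))) (node : List Int) (mapping : List (List Int × List Int)) : Decidable (Pre_get_dimensions_for_each_node_helper_py nodes node mapping) := by unfold Pre_get_dimensions_for_each_node_helper_py; infer_instance

def pvWitness_get_dimensions_for_each_node_helper_py : (List (List Int × Option (List Int × List Int))) × List Int × (List (List Int × List Int)) :=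
  ([([1, 2], some ([1], [2])), ([1], none), ([2], none)], [1, 2], [([3], [7, 8])])

def Spec_get_dimensions_for_each_node_helper_py (nodes : List (List Int × Option (List Int × List Int))) (node : List Int) (mapping : List (List Int × List Int)) (out : List Int) : Prop := out = get_dimensions_for_each_node_helper_py_alt nodes node mapping
instance (nodes : List (List Int × Option (List Int × List Int))) (node : List Int) (mapping : List (List Int × List Int)) (out : List Int) : Decidable (Spec_get_dimensions_for_each_node_helper_py nodes node mapping out) := by unfold Spec_get_dimensions_for_each_node_helper_py; infer_instance

-- ===== CLAIM (what is proved, stated in full; the proofs are below) =====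
def Claim_equal_get_dimensions_for_each_node_helper_py : Prop := ∀ (nodes : List (List Int × Option (List Int × List Int))) (node : List Int) (mapping : List (List Int × List Int)), Dom_get_dimensions_for_each_node_helper_py nodes node mapping → Pre_get_dimensions_for_each_node_helper_py nodes node mapping → Spec_get_dimensions_for_each_node_helper_py nodes node mapping (get_dimensions_for_each_node_helper_py nodes node mapping)

-- ===== LEMMAS AND PROOFS =====

-- the mathematical value both programs compute at a node: lookup in the ORIGINAL mapping first,
-- else concatenate the children's values (fuel-bounded; junk value `n` off the admitted shapes)
def pvVal (nodesD : PySem.Dict (List Int) (Option (List Int × List Int)))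
    (m0 : PySem.Dict (List Int) (List Int)) : Nat → List Int → List Int
  | 0, _ => []
  | f+1, n =>
    match m0.get? n with
    | some v => v
    | none =>
      match nodesD.get? n with
      | some (some (l, r)) => pvVal nodesD m0 f l ++ pvVal nodesD m0 f r
      | _ => n

-- an evolving memo dict is "good": it covers m0's keys and only stores pvVal-values
def pvGood (nodesD : PySem.Dict (List Int) (Option (List Int × List Int)))
    (m0 : PySem.Dict (List Int) (List Int)) (F : Nat)
    (m : PySem.Dict (List Int) (List Int)) : Prop :=
  (∀ k, m0.contains k = true → m.contains k = true) ∧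
  (∀ k v, m.get? k = some v → v = pvVal nodesD m0 F k)

theorem pvVal_stable {nodesD : PySem.Dict (List Int) (Option (List Int × List Int))}
    {m0 : PySem.Dict (List Int) (List Int)} :
    ∀ d n, pvOk nodesD m0 d n = true → ∀ f, d ≤ f →
      pvVal nodesD m0 f n = pvVal nodesD m0 d n := by
  intro d
  induction d with
  | zero => intro n h; simp [pvOk] at h
  | succ d ih =>
    intro n h f hf
    match f, hf with
    | f+1, hf =>
      cases hm : m0.get? n with
      | some v => simp only [pvVal, hm]
      | none =>
        have hmc : m0.contains n = false := by
          rw [PySem.Dict.contains_eq_isSome_get?, hm]; rfl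
        simp only [pvOk, hmc, Bool.false_or] at h
        cases hg : nodesD.get? n with
        | none => simp only [pvVal, hm, hg]
        | some c =>
          cases c with
          | none => simp only [pvVal, hm, hg]
          | some lr =>
            obtain ⟨l, r⟩ := lr
            rw [hg] at h
            simp only [Bool.and_eq_true] at h
            simp only [pvVal, hm, hg]
            rw [ih l h.1 f (by omega), ih r h.2 f (by omega)]

theorem pvVal_node_of_ok {nodesD : PySem.Dict (List Int) (Option (List Int × List Int))}
    {m0 : PySem.Dict (List Int) (List Int)} {d F : Nat} {n l r : List Int}
    (h : pvOk nodesD m0 d n = true) (hF : d ≤ F)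
    (hm : m0.get? n = none) (hg : nodesD.get? n = some (some (l, r))) :
    pvVal nodesD m0 F n = pvVal nodesD m0 F l ++ pvVal nodesD m0 F r := by
  match d, h, hF with
  | d+1, h, hF =>
    have hmc : m0.contains n = false := by
      rw [PySem.Dict.contains_eq_isSome_get?, hm]; rfl
    simp only [pvOk, hmc, hg, Bool.false_or, Bool.and_eq_true] at h
    rw [pvVal_stable (d+1) n (by simp [pvOk, hmc, hg, h.1, h.2]) F hF]
    simp only [pvVal, hm, hg]
    rw [pvVal_stable d l h.1 F (by omega), pvVal_stable d r h.2 F (by omega)]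

theorem pvGood_init (nodesD : PySem.Dict (List Int) (Option (List Int × List Int)))
    (m0 : PySem.Dict (List Int) (List Int)) (F : Nat) (hF : 1 ≤ F) :
    pvGood nodesD m0 F m0 := by
  refine ⟨fun k h => h, fun k v h => ?_⟩
  match F, hF with
  | F+1, _ => simp [pvVal, h]

theorem pvGood_insert {nodesD : PySem.Dict (List Int) (Option (List Int × List Int))}
    {m0 m : PySem.Dict (List Int) (List Int)} {F : Nat} {k : List Int}
    (hgood : pvGood nodesD m0 F m) :
    pvGood nodesD m0 F (m.insert k (pvVal nodesD m0 F k)) := by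
  constructor
  · intro j hj
    rw [PySem.Dict.contains_insert]
    simp [hgood.1 j hj]
  · intro j v hv
    rw [PySem.Dict.get?_insert] at hv
    split at hv
    · cases hv; subst ‹j = k›; rfl
    · exact hgood.2 j v hv

theorem pvGood_not_m0 {nodesD : PySem.Dict (List Int) (Option (List Int × List Int))}
    {m0 m : PySem.Dict (List Int) (List Int)} {F : Nat} {n : List Int}
    (hgood : pvGood nodesD m0 F m) (h : m.get? n = none) : m0.get? n = none := by
  by_contra hne
  have h1 : m0.contains n = true := by
    rw [PySem.Dict.contains_eq_isSome_get?]
    cases hx : m0.get? n with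
    | none => exact absurd hx hne
    | some _ => rfl
  have := hgood.1 n h1
  rw [PySem.Dict.contains_eq_isSome_get?, h] at this
  simp at this

-- A's recursion computes the pvVal-value and keeps the memo good
theorem goA_spec {nodesD : PySem.Dict (List Int) (Option (List Int × List Int))}
    {m0 : PySem.Dict (List Int) (List Int)} {F : Nat} :
    ∀ d n m f, pvOk nodesD m0 d n = true → d ≤ F → pvGood nodesD m0 F m → d ≤ f →
      (goA nodesD f n m).1 = pvVal nodesD m0 F n ∧
      pvGood nodesD m0 F (goA nodesD f n m).2 ∧
      (∀ k, m.contains k = true → (goA nodesD f n m).2.contains k = true) := by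
  intro d
  induction d with
  | zero => intro n m f h; simp [pvOk] at h
  | succ d ih =>
    intro n m f h hdF hgood hdf
    match f, hdf with
    | f+1, hdf =>
      cases hm : m.get? n with
      | some v =>
        simp only [goA, hm]
        exact ⟨hgood.2 n v hm, hgood, fun k hk => hk⟩
      | none =>
        have hm0 : m0.get? n = none := pvGood_not_m0 hgood hm
        have hmc : m0.contains n = false := by
          rw [PySem.Dict.contains_eq_isSome_get?, hm0]; rfl
        simp only [pvOk, hmc, Bool.false_or] at h
        cases hg : nodesD.get? n with
        | none => rw [hg] at h; simp at h
        | some c =>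
          cases c with
          | none =>
            simp only [goA, hm, hg]
            have hv : pvVal nodesD m0 F n = n := by
              match F, hdF with
              | F+1, _ => simp [pvVal, hm0, hg]
            refine ⟨hv.symm, ?_, ?_⟩
            · have := pvGood_insert (k := n) hgood
              rwa [hv] at this
            · intro k hk
              rw [PySem.Dict.contains_insert]
              simp [hk]
          | some lr =>
            obtain ⟨l, r⟩ := lr
            rw [hg] at h
            simp only [Bool.and_eq_true] at h
            obtain ⟨hv1, hgood1, hmono1⟩ := ih l m f h.1 (by omega) hgood (by omega)
            obtain ⟨hv2, hgood2, hmono2⟩ := ih r (goA nodesD f l m).2 f h.2 (by omega) hgood1 (by omega)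
            have hok : pvOk nodesD m0 (d+1) n = true := by
              simp [pvOk, hmc, hg, h.1, h.2]
            have hpv := pvVal_node_of_ok hok hdF hm0 hg
            simp only [goA, hm, hg]
            refine ⟨by rw [hv1, hv2, hpv], ?_, ?_⟩
            · have h5 := pvGood_insert (k := n) hgood2
              rw [hv1, hv2, ← hpv]
              exact h5
            · intro k hk
              rw [PySem.Dict.contains_insert]
              simp [hmono2 k (hmono1 k hk)]

theorem goB_nil (nodesD : PySem.Dict (List Int) (Option (List Int × List Int)))
    (f : Nat) (m : PySem.Dict (List Int) (List Int)) : goB nodesD f [] m = m := by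
  cases f <;> rfl

-- B's loop: popping a well-formed node resolves it within 4^d iterations, keeping the memo good
theorem goB_run {nodesD : PySem.Dict (List Int) (Option (List Int × List Int))}
    {m0 : PySem.Dict (List Int) (List Int)} {F : Nat} :
    ∀ d n m, pvOk nodesD m0 d n = true → d ≤ F → pvGood nodesD m0 F m →
      ∃ k m', k ≤ 4 ^ d ∧ pvGood nodesD m0 F m' ∧
        (∀ j, m.contains j = true → m'.contains j = true) ∧
        m'.contains n = true ∧
        ∀ f rest, goB nodesD (f + k) (n :: rest) m = goB nodesD f rest m' := by
  intro d
  induction d with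
  | zero => intro n m h; simp [pvOk] at h
  | succ d ih =>
    intro n m h hdF hgood
    cases hm : m.get? n with
    | some v =>
      refine ⟨1, m, Nat.one_le_pow _ _ (by omega), hgood, fun j hj => hj, ?_, fun f rest => by
        simp only [goB, hm]⟩
      rw [PySem.Dict.contains_eq_isSome_get?, hm]; rfl
    | none =>
      have hm0 : m0.get? n = none := pvGood_not_m0 hgood hm
      have hmc : m0.contains n = false := by
        rw [PySem.Dict.contains_eq_isSome_get?, hm0]; rfl
      simp only [pvOk, hmc, Bool.false_or] at h
      cases hg : nodesD.get? n with
      | none => rw [hg] at h; simp at h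
      | some c =>
        cases c with
        | none =>
          refine ⟨1, m.insert n n, Nat.one_le_pow _ _ (by omega), ?_, ?_, PySem.Dict.contains_insert_self .., fun f rest => by simp only [goB, hm, hg]⟩
          · have hv : pvVal nodesD m0 F n = n := by
              match F, hdF with
              | F+1, _ => simp [pvVal, hm0, hg]
            have := pvGood_insert (k := n) hgood
            rwa [hv] at this
          · intro j hj
            rw [PySem.Dict.contains_insert]
            simp [hj]
        | some lr =>
          obtain ⟨l, r⟩ := lr
          rw [hg] at h
          simp only [Bool.and_eq_true] at h
          have hok : pvOk nodesD m0 (d+1) n = true := by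
            simp [pvOk, hmc, hg, h.1, h.2]
          have hpv := pvVal_node_of_ok hok hdF hm0 hg
          have hins : ∀ m2 vl vr, pvGood nodesD m0 F m2 →
              m2.get? l = some vl → m2.get? r = some vr →
              pvGood nodesD m0 F (m2.insert n (vl ++ vr)) := by
            intro m2 vl vr hg2 hvl hvr
            have := pvGood_insert (k := n) hg2
            rwa [hpv, ← hg2.2 l vl hvl, ← hg2.2 r vr hvr] at this
          cases hl : m.get? l with
          | some vl =>
            cases hr : m.get? r with
            | some vr =>
              refine ⟨1, m.insert n (vl ++ vr), Nat.one_le_pow _ _ (by omega),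
                hins m vl vr hgood hl hr, ?_, PySem.Dict.contains_insert_self ..,
                fun f rest => by simp only [goB, hm, hg, hl, hr]⟩
              intro j hj
              rw [PySem.Dict.contains_insert]
              simp [hj]
            | none =>
              obtain ⟨k1, m1, hk1, hgood1, hmono1, hcont1, hrun1⟩ := ih l m h.1 (by omega) hgood
              obtain ⟨k2, m2, hk2, hgood2, hmono2, hcont2, hrun2⟩ := ih r m1 h.2 (by omega) hgood1
              have hcl : m2.contains l = true := hmono2 l hcont1
              rw [PySem.Dict.contains_eq_isSome_get?] at hcl hcont2
              obtain ⟨vl, hvl⟩ : ∃ v, m2.get? l = some v := by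
                cases hx : m2.get? l with
                | none => rw [hx] at hcl; simp at hcl
                | some v => exact ⟨v, rfl⟩
              obtain ⟨vr, hvr⟩ : ∃ v, m2.get? r = some v := by
                cases hx : m2.get? r with
                | none => rw [hx] at hcont2; simp at hcont2
                | some v => exact ⟨v, rfl⟩
              have hbound : k1 + k2 + 2 ≤ 4 ^ (d+1) := by
                have h4 : (1:Nat) ≤ 4 ^ d := Nat.one_le_pow _ _ (by omega)
                calc k1 + k2 + 2 ≤ 4 ^ d + 4 ^ d + 2 * 4 ^ d := by omega
                _ = 4 * 4 ^ d := by ring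
                _ = 4 ^ (d+1) := by rw [pow_succ]; ring
              cases hn2 : m2.get? n with
              | some v =>
                refine ⟨k1 + k2 + 2, m2, hbound, hgood2,
                  fun j hj => hmono2 j (hmono1 j hj), ?_, ?_⟩
                · rw [PySem.Dict.contains_eq_isSome_get?, hn2]; rfl
                · intro f rest
                  have e1 : f + (k1 + k2 + 2) = ((f + 1) + k2) + k1 + 1 := by omega
                  rw [e1]
                  show goB nodesD (((f + 1) + k2) + k1 + 1) (n :: rest) m = _
                  simp only [goB, hm, hg, hl, hr]
                  rw [hrun1, hrun2]
                  show goB nodesD (f+1) (n :: rest) m2 = _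
                  simp only [goB, hn2]
              | none =>
                refine ⟨k1 + k2 + 2, m2.insert n (vl ++ vr), hbound,
                  hins m2 vl vr hgood2 hvl hvr,
                  fun j hj => ?_, PySem.Dict.contains_insert_self .., ?_⟩
                · rw [PySem.Dict.contains_insert]
                  simp [hmono2 j (hmono1 j hj)]
                · intro f rest
                  have e1 : f + (k1 + k2 + 2) = ((f + 1) + k2) + k1 + 1 := by omega
                  rw [e1]
                  show goB nodesD (((f + 1) + k2) + k1 + 1) (n :: rest) m = _
                  simp only [goB, hm, hg, hl, hr]
                  rw [hrun1, hrun2]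
                  show goB nodesD (f+1) (n :: rest) m2 = _
                  simp only [goB, hn2, hg, hvl, hvr]
          | none =>
            obtain ⟨k1, m1, hk1, hgood1, hmono1, hcont1, hrun1⟩ := ih l m h.1 (by omega) hgood
            obtain ⟨k2, m2, hk2, hgood2, hmono2, hcont2, hrun2⟩ := ih r m1 h.2 (by omega) hgood1
            have hcl : m2.contains l = true := hmono2 l hcont1
            rw [PySem.Dict.contains_eq_isSome_get?] at hcl hcont2
            obtain ⟨vl, hvl⟩ : ∃ v, m2.get? l = some v := by
              cases hx : m2.get? l with
              | none => rw [hx] at hcl; simp at hcl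
              | some v => exact ⟨v, rfl⟩
            obtain ⟨vr, hvr⟩ : ∃ v, m2.get? r = some v := by
              cases hx : m2.get? r with
              | none => rw [hx] at hcont2; simp at hcont2
              | some v => exact ⟨v, rfl⟩
            have hbound : k1 + k2 + 2 ≤ 4 ^ (d+1) := by
              have h4 : (1:Nat) ≤ 4 ^ d := Nat.one_le_pow _ _ (by omega)
              calc k1 + k2 + 2 ≤ 4 ^ d + 4 ^ d + 2 * 4 ^ d := by omega
              _ = 4 * 4 ^ d := by ring
              _ = 4 ^ (d+1) := by rw [pow_succ]; ring
            cases hn2 : m2.get? n with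
            | some v =>
              refine ⟨k1 + k2 + 2, m2, hbound, hgood2,
                fun j hj => hmono2 j (hmono1 j hj), ?_, ?_⟩
              · rw [PySem.Dict.contains_eq_isSome_get?, hn2]; rfl
              · intro f rest
                have e1 : f + (k1 + k2 + 2) = ((f + 1) + k2) + k1 + 1 := by omega
                rw [e1]
                show goB nodesD (((f + 1) + k2) + k1 + 1) (n :: rest) m = _
                simp only [goB, hm, hg, hl]
                rw [hrun1, hrun2]
                show goB nodesD (f+1) (n :: rest) m2 = _
                simp only [goB, hn2]
            | none =>
              refine ⟨k1 + k2 + 2, m2.insert n (vl ++ vr), hbound,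
                hins m2 vl vr hgood2 hvl hvr,
                fun j hj => ?_, PySem.Dict.contains_insert_self .., ?_⟩
              · rw [PySem.Dict.contains_insert]
                simp [hmono2 j (hmono1 j hj)]
              · intro f rest
                have e1 : f + (k1 + k2 + 2) = ((f + 1) + k2) + k1 + 1 := by omega
                rw [e1]
                show goB nodesD (((f + 1) + k2) + k1 + 1) (n :: rest) m = _
                simp only [goB, hm, hg, hl]
                rw [hrun1, hrun2]
                show goB nodesD (f+1) (n :: rest) m2 = _
                simp only [goB, hn2, hg, hvl, hvr]

-- ===== VERDICT (by name: the statement is the Claim_ definition above) =====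
theorem get_dimensions_for_each_node_helper_py_spec : Claim_equal_get_dimensions_for_each_node_helper_py := by
  intro nodes node mapping _ hpre
  unfold Pre_get_dimensions_for_each_node_helper_py at hpre
  unfold Spec_get_dimensions_for_each_node_helper_py
  unfold get_dimensions_for_each_node_helper_py get_dimensions_for_each_node_helper_py_alt
  cases hm : (PySem.Dict.ofList mapping : PySem.Dict (List Int) (List Int)).get? node with
  | some v =>
    simp only [goA, hm]
  | none =>
    have hgood0 := pvGood_init (PySem.Dict.ofList nodes) (PySem.Dict.ofList mapping)
      (nodes.length + 1) (by omega)
    obtain ⟨hA, -, -⟩ := goA_spec (F := nodes.length + 1) (nodes.length + 1) node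
      (PySem.Dict.ofList mapping) (nodes.length + 2) hpre (le_refl _) hgood0 (by omega)
    obtain ⟨k, m', hk, hgood', -, hcont', hrun⟩ := goB_run (F := nodes.length + 1)
      (nodes.length + 1) node (PySem.Dict.ofList mapping) hpre (le_refl _) hgood0
    have e1 : 4 ^ (nodes.length + 1) = (4 ^ (nodes.length + 1) - k) + k := by omega
    rw [PySem.Dict.contains_eq_isSome_get?] at hcont'
    obtain ⟨w, hw⟩ : ∃ w, m'.get? node = some w := by
      cases hx : m'.get? node with
      | none => rw [hx] at hcont'; simp at hcont'
      | some w => exact ⟨w, rfl⟩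
    simp only [hm]
    rw [e1, hrun, goB_nil, hw, hA, hgood'.2 node w hw]
    rfl
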